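-- pv_equiv track=rewrite | github.com/yashslakhtariya/sem6practicals | INS/p4_complex_encrypt_only.py | fill_letter
-- ===== SOURCE A (Python) =====
-- def fill_letter(text):
--     k = len(text)
--     if k % 2 == 0:
--         for i in range(0, k, 2):
--             if text[i] == text[i + 1]:
--                 new_word = text[0 : i + 1] + "x" + text[i + 1 :]
--                 new_word = fill_letter(new_word)
--                 break
--         else:
--             new_word = text
--     else:
--         for i in range(0, k - 1, 2):
--             if text[i] == text[i + 1]:
--                 new_word = text[0 : i + 1] + "x" + text[i + 1 :]
--                 new_word = fill_letter(new_word)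
--                 break
--         else:
--             new_word = text
--     return new_word
-- ===== SOURCE B (Python) =====
-- def fill_letter(text):
--     out = []
--     i = 0
--     n = len(text)
--     while i + 1 < n:
--         if text[i] == text[i + 1]:
--             out.append(text[i])
--             out.append("x")
--             i += 1
--         else:
--             out.append(text[i])
--             out.append(text[i + 1])
--             i += 2
--     if i < n:
--         out.append(text[i])
--     return "".join(out)
-- ===== Notes on version B (the rewrite author's own statement) =====
-- stated objective: faster
-- what changed: A restarts a from-scratch pair scan and rebuilds the whole string after every insertion; B makes one forward pass, emitting c,'x' and advancing 1 at an equal pair and advancing 2 otherwise.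
import Mathlib
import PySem

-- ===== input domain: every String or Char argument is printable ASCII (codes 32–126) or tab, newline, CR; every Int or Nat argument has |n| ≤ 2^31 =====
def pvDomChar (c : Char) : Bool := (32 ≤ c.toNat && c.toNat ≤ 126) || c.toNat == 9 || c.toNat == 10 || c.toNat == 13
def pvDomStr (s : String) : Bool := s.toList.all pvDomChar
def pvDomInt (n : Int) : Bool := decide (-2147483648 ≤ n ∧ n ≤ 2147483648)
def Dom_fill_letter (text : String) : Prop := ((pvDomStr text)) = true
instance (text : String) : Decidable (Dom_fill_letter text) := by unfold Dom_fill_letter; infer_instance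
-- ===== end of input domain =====

-- B replaces A's repeated rescan-and-reinsert recursion by a single forward pass that
-- advances 1 past an equal pair (emitting an 'x') and 2 otherwise (objective: faster).


-- ===== PORT A =====
-- A's inner for-loop: scan adjacent pairs at even indices; at the first equal pair
-- insert 'x' after its first letter and report the new string, else none.
-- (Python's two branches, range(0,k,2) for even k and range(0,k-1,2) for odd k,
-- visit exactly the same pair indices 0,2,…; this one scan is both of them.)
def flStep : List Char → Option (List Char)
  | a :: b :: rest =>
    if a == b then some (a :: 'x' :: b :: rest)
    else (flStep rest).map (fun r => a :: b :: r)
  | _ => none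

-- A's recursion 'new_word = fill_letter(new_word)'. On inputs where A recurses without
-- bound (RecursionError) the fuel merely makes this total; on every input admitted by
-- Pre_fill_letter the fuel text.length+1 is never exhausted (proved below via eqCount),
-- so there this is A's computation step for step.
def flGo : Nat → List Char → List Char
  | 0, l => l
  | f + 1, l =>
    match flStep l with
    | some l' => flGo f l'
    | none => l

def fill_letter (text : String) : String :=
  String.ofList (flGo (text.toList.length + 1) text.toList)

-- ===== PORT B =====
-- single forward pass: emit c,'x' and advance 1 on an equal pair, else emit both and advance 2
def altL : List Char → List Char
  | [] => []
  | [c] => [c]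
  | a :: b :: rest =>
    if a == b then a :: 'x' :: altL (b :: rest)
    else a :: b :: altL rest

def fill_letter_alt (text : String) : String :=
  String.ofList (altL text.toList)

-- ===== PRECONDITION & SPEC =====
-- Does the digraph pair scan (step 1 past an equal pair, else 2) ever sit on an 'xx' pair?
-- This is exactly the set of inputs on which A recurses forever; it has no simpler
-- positional description (whether a given 'xx' is hit depends on the pattern of runs before it).
def badScan : List Char → Bool
  | c :: d :: t => if c = d then (c == 'x') || badScan (d :: t) else badScan t
  | _ => false

-- Pre_ excludes exactly the inputs on which A recurses forever and raises RecursionError: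
-- those whose pair scan reaches an adjacent 'xx' pair. On every other input A returns.
def Pre_fill_letter (text : String) : Prop := badScan text.toList = false
instance (text : String) : Decidable (Pre_fill_letter text) := by unfold Pre_fill_letter; infer_instance

def pvWitness_fill_letter : String := "hello world"

def Spec_fill_letter (text : String) (out : String) : Prop := out = fill_letter_alt text
instance (text : String) (out : String) : Decidable (Spec_fill_letter text out) := by unfold Spec_fill_letter; infer_instance

-- ===== CLAIM (what is proved, stated in full; the proofs are below) =====
def Claim_equal_fill_letter : Prop := ∀ (text : String), Dom_fill_letter text → Pre_fill_letter text → Spec_fill_letter text (fill_letter text)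

-- ===== LEMMAS AND PROOFS =====

-- number of adjacent equal pairs; the termination measure of A's recursion
def eqCount : List Char → Nat
  | a :: b :: rest => (if a = b then 1 else 0) + eqCount (b :: rest)
  | _ => 0

theorem eqCount_le_length : ∀ l : List Char, eqCount l ≤ l.length
  | [] => by simp [eqCount]
  | [c] => by simp [eqCount]
  | a :: b :: rest => by
    have h : eqCount (b :: rest) ≤ rest.length + 1 := by
      simpa using eqCount_le_length (b :: rest)
    simp only [eqCount, List.length_cons]
    split_ifs <;> omega

theorem flStep_none (l : List Char) (h : flStep l = none) : altL l = l := by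
  match l with
  | [] => simp [altL]
  | [c] => simp [altL]
  | a :: b :: rest =>
    simp only [flStep] at h
    split_ifs at h with hab
    rw [Option.map_eq_none_iff] at h
    have := flStep_none rest h
    simp [altL, hab, this]

theorem flStep_head (l l' : List Char) (h : flStep l = some l') : l'.head? = l.head? := by
  match l with
  | [] => simp [flStep] at h
  | [c] => simp [flStep] at h
  | a :: b :: rest =>
    simp only [flStep] at h
    split_ifs at h with hab
    · simp at h; subst h; rfl
    · cases hs : flStep rest with
      | none => rw [hs] at h; simp at h
      | some r => rw [hs] at h; simp at h; subst h; rfl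

theorem flStep_some (l l' : List Char) (hx : badScan l = false) (h : flStep l = some l') :
    altL l' = altL l ∧ badScan l' = false ∧ eqCount l' + 1 = eqCount l := by
  match l with
  | [] => simp [flStep] at h
  | [c] => simp [flStep] at h
  | a :: b :: rest =>
    simp only [flStep] at h
    split_ifs at h with hab
    · have hab' : a = b := eq_of_beq hab
      subst hab'
      simp only [badScan, if_true, Bool.or_eq_false_iff, beq_eq_false_iff_ne] at hx
      have hax : a ≠ 'x' := hx.1
      simp only [Option.some.injEq] at h
      subst h
      refine ⟨?_, ?_, ?_⟩
      · simp [altL, hax]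
      · simp [badScan, hax, hx.2]
      · simp [eqCount, hax, Ne.symm hax]
        omega
    · have hab' : a ≠ b := by simpa using hab
      rw [badScan, if_neg hab'] at hx
      cases hs : flStep rest with
      | none => rw [hs] at h; simp at h
      | some r =>
        rw [hs] at h
        simp only [Option.map_some, Option.some.injEq] at h
        subst h
        obtain ⟨ih1, ih2, ih3⟩ := flStep_some rest r hx hs
        have hhead : r.head? = rest.head? := flStep_head rest r hs
        refine ⟨?_, ?_, ?_⟩
        · simp [altL, hab', ih1]
        · simp [badScan, hab', ih2]
        · -- eqCount (a::b::r) vs (a::b::rest): pair (b, head r) same as (b, head rest)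
          cases r with
          | nil =>
            cases rest with
            | nil => simp [flStep] at hs
            | cons c' t' => simp at hhead
          | cons c t =>
            cases rest with
            | nil => simp [flStep] at hs
            | cons c' t' =>
              simp only [List.head?] at hhead
              have hcc : c = c' := by simpa using hhead
              subst hcc
              simp only [eqCount, hab'] at *
              omega

theorem flGo_eq_altL : ∀ (f : Nat) (l : List Char), eqCount l < f → badScan l = false →
    flGo f l = altL l := by
  intro f
  induction f with
  | zero => intro l h; omega
  | succ f ih =>
    intro l hlt hx
    cases hs : flStep l with
    | none => simp [flGo, hs, flStep_none l hs]
    | some l' =>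
      obtain ⟨h1, h2, h3⟩ := flStep_some l l' hx hs
      have : flGo f l' = altL l' := ih l' (by omega) h2
      simp [flGo, hs, this, h1]

-- ===== VERDICT (by name: the statement is the Claim_ definition above) =====
theorem fill_letter_spec : Claim_equal_fill_letter := by
  intro text _ hpre
  unfold Spec_fill_letter fill_letter fill_letter_alt
  have h := eqCount_le_length text.toList
  rw [flGo_eq_altL (text.toList.length + 1) text.toList (by omega) hpre]
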